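-- pv_equiv track=rewrite | github.com/MaksimKovalyukEvg/ai-support-devops-demo | kb_pipeline/rate_cards.py | parse_rating
-- ===== SOURCE A (Python) =====
-- def parse_rating(text: str):
--     score = None
--     verdict = ""
--     reason = ""
--
--     for line in text.splitlines():
--         line = line.strip()
--         low = line.lower()
--         if low.startswith("score:"):
--             try:
--                 score = int(line.split(":", 1)[1].strip())
--             except:
--                 score = 0
--         elif low.startswith("verdict:"):
--             verdict = line.split(":", 1)[1].strip()
--         elif low.startswith("reason:"):
--             reason = line.split(":", 1)[1].strip()
--
--     if score is None:
--         score = 0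
--     return score, verdict, reason
-- ===== SOURCE B (Python) =====
-- def parse_rating(text: str):
--     fields = {}
--     for line in text.splitlines():
--         line = line.strip()
--         key, sep, value = line.partition(":")
--         if sep:
--             fields[key.lower()] = value.strip()
--     verdict = fields.get("verdict", "")
--     reason = fields.get("reason", "")
--     raw = fields.get("score")
--     if raw is None:
--         score = 0
--     else:
--         try:
--             score = int(raw)
--         except:
--             score = 0
--     return score, verdict, reason
-- ===== Notes on version B (the rewrite author's own statement) =====
-- stated objective: alternative
-- what changed: A's per-field branch chain with three mutable state variables is replaced by a generic one-pass key/value parse into a dict (partition at the first colon, lowercased key, last occurrence wins) followed by a single interpretation step that reads score/verdict/reason out of the dict, with the int conversion done once after the loop.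
import Mathlib
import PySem

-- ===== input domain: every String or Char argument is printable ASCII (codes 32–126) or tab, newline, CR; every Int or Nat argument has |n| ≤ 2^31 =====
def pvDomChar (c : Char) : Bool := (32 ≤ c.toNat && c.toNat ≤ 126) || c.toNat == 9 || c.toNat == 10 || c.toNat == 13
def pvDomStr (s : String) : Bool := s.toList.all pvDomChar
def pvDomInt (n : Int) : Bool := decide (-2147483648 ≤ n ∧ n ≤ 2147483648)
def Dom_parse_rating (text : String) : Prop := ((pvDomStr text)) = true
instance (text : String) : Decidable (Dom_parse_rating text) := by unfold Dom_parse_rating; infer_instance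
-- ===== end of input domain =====

-- B replaces A's per-field branch chain by a generic one-pass "key: value" parse into a dict
-- followed by a single interpretation step (decomposition; same cost, return value identical).

-- ===== PORT A =====
-- loop body of A (named so the proofs can speak about one iteration)
def pvStepA (st : Option Int × String × String) (line0 : String) : Option Int × String × String :=
  let line := PySem.Str.strip line0
  let low := PySem.Str.lower line
  if PySem.Str.startswith low "score:" then
    -- try: int(line.split(":",1)[1].strip()) except: 0  (bare except: a none from the
    -- index or from int() both become 0, exactly Python's bare-except behaviour)
    let parts := (PySem.Str.splitMax? line ":" 1).getD []
    (some ((((PySem.List.pyGet? parts 1).map PySem.Str.strip).bind PySem.Int.ofStr?).getD 0),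
     st.2.1, st.2.2)
  else if PySem.Str.startswith low "verdict:" then
    -- the index [1] is always in range here: the line starts with "verdict:" so ':' occurs
    let parts := (PySem.Str.splitMax? line ":" 1).getD []
    (st.1, PySem.Str.strip ((PySem.List.pyGet? parts 1).getD ""), st.2.2)
  else if PySem.Str.startswith low "reason:" then
    let parts := (PySem.Str.splitMax? line ":" 1).getD []
    (st.1, st.2.1, PySem.Str.strip ((PySem.List.pyGet? parts 1).getD ""))
  else st

-- literal transliteration of A: fold over splitlines with state (score : Option Int, verdict, reason)
def parse_rating (text : String) : Int × String × String :=
  let res := (PySem.Str.splitlines text).foldl pvStepA ((none : Option Int), "", "")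
  (res.1.getD 0, res.2.1, res.2.2)

-- ===== PORT B =====
-- hand port of Source B's `line.partition(":")` restricted to its one-char separator:
-- splits at the FIRST ':' (none when there is no ':'), exactly Python's str.partition
def pvPartitionColon : List Char → Option (List Char × List Char)
  | [] => none
  | c :: rest =>
      if c = ':' then some ([], rest)
      else (pvPartitionColon rest).map (fun p => (c :: p.1, p.2))

-- loop body of Source B: store fields[key.lower()] = value.strip() when a ':' is present
def pvStepB (d : PySem.Dict String String) (line0 : String) : PySem.Dict String String :=
  let cs := PySem.Chars.strip line0.toList
  match pvPartitionColon cs with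
  | none => d
  | some (k, v) =>
      d.insert (String.ofList (PySem.Chars.lower k)) (String.ofList (PySem.Chars.strip v))

def parse_rating_alt (text : String) : Int × String × String :=
  let fields := (PySem.Str.splitlines text).foldl pvStepB PySem.Dict.empty
  let verdict := fields.getD "verdict" ""
  let reason := fields.getD "reason" ""
  let score : Int :=
    match fields.get? "score" with
    | none => 0
    | some raw => (PySem.Int.ofStr? raw).getD 0   -- try: int(raw) except: 0
  (score, verdict, reason)

-- ===== PRECONDITION & SPEC =====
def Spec_parse_rating (text : String) (out : Int × String × String) : Prop := out = parse_rating_alt text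
instance (text : String) (out : Int × String × String) : Decidable (Spec_parse_rating text out) := by unfold Spec_parse_rating; infer_instance

-- ===== CLAIM (what is proved, stated in full; the proofs are below) =====
def Claim_equal_parse_rating : Prop := ∀ (text : String), Dom_parse_rating text → Spec_parse_rating text (parse_rating text)

-- ===== LEMMAS AND PROOFS =====

theorem pvLowerChar_eq_colon {c : Char} (h : PySem.Chars.lowerChar c = ':') : c = ':' := by
  unfold PySem.Chars.lowerChar at h
  split at h
  · rename_i hu
    simp only [PySem.Chars.isupper, Bool.and_eq_true, decide_eq_true_eq, Char.le_def] at hu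
    obtain ⟨h1, h2⟩ := hu
    rw [UInt32.le_iff_toNat_le] at h1 h2
    have hA : ('A' : Char).val.toNat = 65 := by decide
    have hZ : ('Z' : Char).val.toNat = 90 := by decide
    rw [hA] at h1; rw [hZ] at h2
    exfalso
    have hv : (c.toNat + 32).isValidChar := by
      unfold Nat.isValidChar
      left
      change c.val.toNat + 32 < 55296
      omega
    have hn : (Char.ofNat (c.toNat + 32)).toNat = c.toNat + 32 := by
      simp [Char.ofNat, hv, Char.ofNatAux]
      change c.val.toNat + 32 < _
      omega
    have h3 := congrArg Char.toNat h
    rw [hn] at h3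
    have h58 : (':' : Char).toNat = 58 := by decide
    change c.val.toNat + 32 = ':'.toNat at h3
    omega
  · exact h

theorem pvColon_not_mem_lower {k : List Char} (h : ':' ∉ k) :
    ':' ∉ PySem.Chars.lower k := by
  intro hm
  unfold PySem.Chars.lower at hm
  obtain ⟨c, hc, he⟩ := List.mem_map.mp hm
  exact h (pvLowerChar_eq_colon he ▸ hc)

theorem pvPartitionColon_none {t : List Char} : ∀ (_ : pvPartitionColon t = none), ':' ∉ t := by
  induction t with
  | nil => intro _ hm; simp at hm
  | cons c rest ih =>
      intro h hm
      unfold pvPartitionColon at h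
      by_cases hc : c = ':'
      · simp [hc] at h
      · simp [hc] at h
        rcases List.mem_cons.mp hm with h1 | h2
        · exact hc h1.symm
        · exact ih h h2

theorem pvPartitionColon_some {t : List Char} :
    ∀ {k v : List Char}, pvPartitionColon t = some (k, v) → t = k ++ ':' :: v ∧ ':' ∉ k := by
  induction t with
  | nil => intro k v h; simp [pvPartitionColon] at h
  | cons c rest ih =>
      intro k v h
      unfold pvPartitionColon at h
      by_cases hc : c = ':'
      · simp [hc] at h
        obtain ⟨h1, h2⟩ := h
        subst h1; subst h2; subst hc
        exact ⟨rfl, by simp⟩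
      · simp [hc] at h
        rcases hp : pvPartitionColon rest with _ | ⟨k', v'⟩
        · rw [hp] at h; simp at h
        · rw [hp] at h
          simp at h
          obtain ⟨h1, h2⟩ := h
          obtain ⟨ht, hk⟩ := ih hp
          subst h2
          rw [← h1]
          constructor
          · rw [ht]; rfl
          · intro hm
            rcases List.mem_cons.mp hm with e1 | e2
            · exact hc e1.symm
            · exact hk e2

theorem pvPrefix_colon {w : List Char} :
    ∀ {k v : List Char}, ':' ∉ w → ':' ∉ k → ((w ++ [':']) <+: (k ++ ':' :: v) ↔ w = k) := by
  induction w with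
  | nil =>
      intro k v _ hk
      cases k with
      | nil => simp
      | cons c k' =>
          simp only [List.nil_append, List.cons_append, List.cons_prefix_cons]
          constructor
          · rintro ⟨h1, -⟩; exact absurd (by simp [← h1]) hk
          · intro h; simp at h
  | cons a w' ih =>
      intro k v hw hk
      have ha : a ≠ ':' := fun e => hw (by simp [e])
      have hw' : ':' ∉ w' := fun e => hw (by simp [e])
      cases k with
      | nil =>
          simp only [List.cons_append, List.nil_append, List.cons_prefix_cons]
          constructor
          · rintro ⟨h1, -⟩; exact absurd h1 ha
          · intro h; simp at h
      | cons b k' =>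
          have hk' : ':' ∉ k' := fun e => hk (by simp [e])
          simp only [List.cons_append, List.cons_prefix_cons]
          rw [ih hw' hk']
          constructor
          · rintro ⟨h1, h2⟩; rw [h1, h2]
          · intro h; injection h with h1 h2; exact ⟨h1, h2⟩

theorem pvStartswith_iff {w k v : List Char} (hw : ':' ∉ w) (hk : ':' ∉ k) :
    (PySem.Chars.startswith (PySem.Chars.lower (k ++ ':' :: v)) (w ++ [':']) = true) ↔
      PySem.Chars.lower k = w := by
  have hlk : ':' ∉ PySem.Chars.lower k := pvColon_not_mem_lower hk
  have hsplit : PySem.Chars.lower (k ++ ':' :: v) =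
      PySem.Chars.lower k ++ ':' :: PySem.Chars.lower v := by
    simp [PySem.Chars.lower, PySem.Chars.lowerChar, PySem.Chars.isupper]
  rw [hsplit]
  rw [show (PySem.Chars.startswith (PySem.Chars.lower k ++ ':' :: PySem.Chars.lower v) (w ++ [':']) = true) ↔
      (w ++ [':']) <+: (PySem.Chars.lower k ++ ':' :: PySem.Chars.lower v) from PySem.Chars.startswith_iff _ _]
  rw [pvPrefix_colon hw hlk]
  exact eq_comm

theorem pvStartswith_false_of_no_colon {t w : List Char} (ht : ':' ∉ t) (hw : ':' ∈ w) :
    PySem.Chars.startswith (PySem.Chars.lower t) w = false := by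
  rw [Bool.eq_false_iff]
  intro hs
  have hp := (PySem.Chars.startswith_iff _ _).mp hs
  have : ':' ∈ PySem.Chars.lower t := hp.subset hw
  exact pvColon_not_mem_lower ht this

theorem pvGo_zero (v : List Char) (acc : List (List Char)) (fuel : Nat) :
    PySem.Chars.splitOnMax.go [':'] fuel 0 v [] acc = acc.reverse ++ [v] := by
  cases fuel with
  | zero => simp [PySem.Chars.splitOnMax.go]
  | succ f =>
      cases v with
      | nil => simp [PySem.Chars.splitOnMax.go]
      | cons c rest => simp [PySem.Chars.splitOnMax.go]

theorem pvGo_one {k : List Char} (hk : ':' ∉ k) :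
    ∀ (v cur : List Char) (acc : List (List Char)) (fuel : Nat), k.length + 1 ≤ fuel →
    PySem.Chars.splitOnMax.go [':'] fuel 1 (k ++ ':' :: v) cur acc =
      acc.reverse ++ [cur.reverse ++ k, v] := by
  induction k with
  | nil =>
      intro v cur acc fuel hf
      cases fuel with
      | zero => omega
      | succ f =>
          simp only [List.nil_append]
          rw [show PySem.Chars.splitOnMax.go [':'] (f+1) 1 (':' :: v) cur acc =
            PySem.Chars.splitOnMax.go [':'] f 0 (List.drop 1 (':' :: v)) [] (cur.reverse :: acc) from by
              simp [PySem.Chars.splitOnMax.go, List.isPrefixOf]]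
          simp [pvGo_zero]
  | cons c k' ih =>
      intro v cur acc fuel hf
      have hc : c ≠ ':' := fun e => hk (by simp [e])
      have hk' : ':' ∉ k' := fun e => hk (by simp [e])
      cases fuel with
      | zero => simp at hf
      | succ f =>
          have hf' : k'.length + 1 ≤ f := by simp at hf; omega
          have step : PySem.Chars.splitOnMax.go [':'] (f+1) 1 (c :: (k' ++ ':' :: v)) cur acc =
              PySem.Chars.splitOnMax.go [':'] f 1 (k' ++ ':' :: v) (c :: cur) acc := by
            simp [PySem.Chars.splitOnMax.go, List.isPrefixOf, Ne.symm hc]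
          refine step.trans ?_
          rw [ih hk' v (c :: cur) acc f hf']
          simp

theorem pvSplitMax {k v : List Char} (hk : ':' ∉ k) :
    PySem.Chars.splitMax? (k ++ ':' :: v) [':'] 1 = some [k, v] := by
  have h1 : PySem.Chars.splitOnMax (k ++ ':' :: v) [':'] 1 = [k, v] := by
    rw [PySem.Chars.splitOnMax.eq_def]
    rw [if_neg (by norm_num)]
    rw [show Int.toNat 1 = 1 from rfl]
    rw [pvGo_one hk v [] [] ((k ++ ':' :: v).length + 1) (by simp)]
    simp
  simp [PySem.Chars.splitMax?, h1]

theorem pvOfList_ne {l : List Char} {s : String} (h : l ≠ s.toList) :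
    String.ofList l ≠ s := by
  intro e
  exact h (by simpa using congrArg String.toList e)

theorem pvStr_ext {s t : String} (h : s.toList = t.toList) : s = t := by
  have := congrArg String.ofList h
  simpa using this

theorem pvStrip_ofList (v : List Char) :
    PySem.Str.strip (String.ofList v) = String.ofList (PySem.Chars.strip v) := by
  apply pvStr_ext
  simp [PySem.Str.toList_strip]

-- the invariant tying A's running state to B's dict
def pvRel (st : Option Int × String × String) (d : PySem.Dict String String) : Prop :=
  st.1 = (d.get? "score").map (fun raw => (PySem.Int.ofStr? raw).getD 0) ∧
  st.2.1 = d.getD "verdict" "" ∧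
  st.2.2 = d.getD "reason" ""

theorem pvStep (st : Option Int × String × String) (d : PySem.Dict String String)
    (line0 : String) (h : pvRel st d) : pvRel (pvStepA st line0) (pvStepB d line0) := by
  obtain ⟨hsc, hvd, hrs⟩ := h
  unfold pvStepA pvStepB
  simp only [PySem.Str.startswith_eq, PySem.Str.toList_lower, PySem.Str.toList_strip]
  set t := PySem.Chars.strip line0.toList with htdef
  rcases hp : pvPartitionColon t with _ | ⟨k, v⟩
  · -- no colon in the stripped line: A keeps its state, B keeps its dict
    have ht := pvPartitionColon_none hp
    rw [pvStartswith_false_of_no_colon ht (show ':' ∈ ("score:" : String).toList by decide),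
        pvStartswith_false_of_no_colon ht (show ':' ∈ ("verdict:" : String).toList by decide),
        pvStartswith_false_of_no_colon ht (show ':' ∈ ("reason:" : String).toList by decide)]
    simp only [Bool.false_eq_true, if_false]
    exact ⟨hsc, hvd, hrs⟩
  · obtain ⟨ht, hk⟩ := pvPartitionColon_some hp
    have hsm : PySem.Str.splitMax? (PySem.Str.strip line0) ":" 1 =
        some [String.ofList k, String.ofList v] := by
      unfold PySem.Str.splitMax?
      rw [PySem.Str.toList_strip, ← htdef, ht]
      rw [show (":" : String).toList = [':'] from rfl]
      rw [pvSplitMax hk]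
      rfl
    have hget : PySem.List.pyGet? [String.ofList k, String.ofList v] (1 : Int) =
        some (String.ofList v) := by
      simp [PySem.List.pyGet?, PySem.List.pyIdx?]
    have hscond : (PySem.Chars.startswith (PySem.Chars.lower t) ("score:" : String).toList = true) ↔
        PySem.Chars.lower k = ("score" : String).toList := by
      rw [ht, show ("score:" : String).toList = ("score" : String).toList ++ [':'] from by decide]
      exact pvStartswith_iff (by decide) hk
    have hvcond : (PySem.Chars.startswith (PySem.Chars.lower t) ("verdict:" : String).toList = true) ↔
        PySem.Chars.lower k = ("verdict" : String).toList := by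
      rw [ht, show ("verdict:" : String).toList = ("verdict" : String).toList ++ [':'] from by decide]
      exact pvStartswith_iff (by decide) hk
    have hrcond : (PySem.Chars.startswith (PySem.Chars.lower t) ("reason:" : String).toList = true) ↔
        PySem.Chars.lower k = ("reason" : String).toList := by
      rw [ht, show ("reason:" : String).toList = ("reason" : String).toList ++ [':'] from by decide]
      exact pvStartswith_iff (by decide) hk
    simp only [hsm, hget, Option.getD_some, Option.map_some, Option.bind_some]
    by_cases e1 : PySem.Chars.lower k = ("score" : String).toList
    · rw [if_pos (hscond.mpr e1)]
      have hkey : String.ofList (PySem.Chars.lower k) = "score" := by rw [e1]; simp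
      rw [hkey]
      refine ⟨?_, ?_, ?_⟩
      · show _ = ((d.insert "score" _).get? "score").map _
        rw [PySem.Dict.get?_insert_self]
        simp [pvStrip_ofList]
      · show st.2.1 = (d.insert "score" _).getD "verdict" ""
        rw [PySem.Dict.getD_insert, if_neg (by decide)]
        exact hvd
      · show st.2.2 = (d.insert "score" _).getD "reason" ""
        rw [PySem.Dict.getD_insert, if_neg (by decide)]
        exact hrs
    · rw [if_neg (fun hc => e1 (hscond.mp hc))]
      by_cases e2 : PySem.Chars.lower k = ("verdict" : String).toList
      · rw [if_pos (hvcond.mpr e2)]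
        have hkey : String.ofList (PySem.Chars.lower k) = "verdict" := by rw [e2]; simp
        rw [hkey]
        refine ⟨?_, ?_, ?_⟩
        · show st.1 = ((d.insert "verdict" _).get? "score").map _
          rw [PySem.Dict.get?_insert_of_ne _ _ (by decide)]
          exact hsc
        · show _ = (d.insert "verdict" _).getD "verdict" ""
          rw [PySem.Dict.getD_insert, if_pos rfl]
          exact pvStrip_ofList v
        · show st.2.2 = (d.insert "verdict" _).getD "reason" ""
          rw [PySem.Dict.getD_insert, if_neg (by decide)]
          exact hrs
      · rw [if_neg (fun hc => e2 (hvcond.mp hc))]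
        by_cases e3 : PySem.Chars.lower k = ("reason" : String).toList
        · rw [if_pos (hrcond.mpr e3)]
          have hkey : String.ofList (PySem.Chars.lower k) = "reason" := by rw [e3]; simp
          rw [hkey]
          refine ⟨?_, ?_, ?_⟩
          · show st.1 = ((d.insert "reason" _).get? "score").map _
            rw [PySem.Dict.get?_insert_of_ne _ _ (by decide)]
            exact hsc
          · show st.2.1 = (d.insert "reason" _).getD "verdict" ""
            rw [PySem.Dict.getD_insert, if_neg (by decide)]
            exact hvd
          · show _ = (d.insert "reason" _).getD "reason" ""
            rw [PySem.Dict.getD_insert, if_pos rfl]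
            exact pvStrip_ofList v
        · rw [if_neg (fun hc => e3 (hrcond.mp hc))]
          refine ⟨?_, ?_, ?_⟩
          · show st.1 = ((d.insert _ _).get? "score").map _
            rw [PySem.Dict.get?_insert_of_ne _ _ (Ne.symm (pvOfList_ne e1))]
            exact hsc
          · show st.2.1 = (d.insert _ _).getD "verdict" ""
            rw [PySem.Dict.getD_insert, if_neg (Ne.symm (pvOfList_ne e2))]
            exact hvd
          · show st.2.2 = (d.insert _ _).getD "reason" ""
            rw [PySem.Dict.getD_insert, if_neg (Ne.symm (pvOfList_ne e3))]
            exact hrs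

theorem pvFold (lines : List String) :
    ∀ st d, pvRel st d → pvRel (lines.foldl pvStepA st) (lines.foldl pvStepB d) := by
  induction lines with
  | nil => intro st d h; exact h
  | cons l ls ih =>
      intro st d h
      rw [List.foldl_cons, List.foldl_cons]
      exact ih _ _ (pvStep st d l h)

-- ===== VERDICT (by name: the statement is the Claim_ definition above) =====
theorem parse_rating_spec : Claim_equal_parse_rating := by
  intro text _
  unfold Spec_parse_rating parse_rating parse_rating_alt
  obtain ⟨h1, h2, h3⟩ := pvFold (PySem.Str.splitlines text) (none, "", "") PySem.Dict.empty
    ⟨rfl, rfl, rfl⟩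
  refine Prod.ext ?_ (Prod.ext h2 h3)
  simp only [h1]
  cases (((PySem.Str.splitlines text).foldl pvStepB PySem.Dict.empty).get? "score") <;> rfl
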